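-- pv_equiv track=rewrite | github.com/Readon/vllm | vllm/attention/backends/turing_attn.py | _group_by_sequence_length
-- ===== SOURCE A (Python) =====
-- def _group_by_sequence_length(requests: list) -> list:
--     """Group requests by similar sequence lengths."""
--     # Sort by sequence length and group similar lengths
--     sorted_requests = sorted(requests, key=lambda x: x['seq_len'])
--     groups = []
--     current_group = []
--     current_len = 0
--
--     for req in sorted_requests:
--         if not current_group or abs(req['seq_len'] - current_len) <= 128:
--             current_group.append(req)
--             current_len = req['seq_len']
--         else:
--             groups.append(current_group)
--             current_group = [req]
--             current_len = req['seq_len']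
--
--     if current_group:
--         groups.append(current_group)
--
--     return groups
-- ===== SOURCE B (Python) =====
-- def _solve(s):
--     # divide and conquer over the sorted list: split at the midpoint, group
--     # each half recursively, then join the halves, fusing the last group of
--     # the left with the first group of the right when the boundary gap <= 128
--     if len(s) <= 1:
--         return [s] if s else []
--     mid = len(s) // 2
--     left = _solve(s[:mid])
--     right = _solve(s[mid:])
--     if s[mid]['seq_len'] - s[mid - 1]['seq_len'] <= 128:
--         return left[:-1] + [left[-1] + right[0]] + right[1:]
--     return left + right
--
--
-- def _group_by_sequence_length(requests: list) -> list:
--     """Group requests by similar sequence lengths."""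
--     return _solve(sorted(requests, key=lambda x: x['seq_len']))
-- ===== Notes on version B (the rewrite author's own statement) =====
-- stated objective: alternative
-- what changed: Replaces A's single accumulate-into-current-group pass (groups/current_group/current_len state, abs test, trailing flush) by a divide-and-conquer: the sorted list is split at the midpoint, each half is grouped recursively, and the halves are joined by fusing the boundary groups exactly when the midpoint gap is <= 128; correct because group boundaries depend only on consecutive gaps, so each half's internal boundaries are unchanged and only the junction needs deciding.
import Mathlib
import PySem

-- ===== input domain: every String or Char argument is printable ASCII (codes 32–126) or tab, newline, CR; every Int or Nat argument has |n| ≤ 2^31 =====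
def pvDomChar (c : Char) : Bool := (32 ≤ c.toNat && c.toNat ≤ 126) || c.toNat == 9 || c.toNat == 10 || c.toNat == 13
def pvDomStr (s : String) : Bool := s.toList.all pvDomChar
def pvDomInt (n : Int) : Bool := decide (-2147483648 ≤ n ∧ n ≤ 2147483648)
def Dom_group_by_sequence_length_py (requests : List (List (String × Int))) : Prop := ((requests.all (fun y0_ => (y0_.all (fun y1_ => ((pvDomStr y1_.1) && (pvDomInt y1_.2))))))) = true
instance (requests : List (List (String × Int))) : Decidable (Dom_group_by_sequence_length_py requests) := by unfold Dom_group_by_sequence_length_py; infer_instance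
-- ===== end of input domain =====

-- B replaces A's accumulate-into-current-group pass by a divide-and-conquer on the sorted list
-- (split at the midpoint, group the halves recursively, fuse the boundary groups when the
-- midpoint gap is <= 128); alternative algorithm, same asymptotic cost.


-- shared key lookup: req['seq_len'] (Pre_ guarantees the key is present, so the default 0 is never used)
def slen (r : List (String × Int)) : Int := (PySem.Dict.mk r).getD "seq_len" 0

-- ===== PORT A =====
-- sorted(requests, key=…); the for-loop is a foldl over (groups, current_group, current_len);
-- the trailing 'if current_group' flush follows.
def group_by_sequence_length_py (requests : List (List (String × Int))) : List (List (List (String × Int))) :=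
  let sorted_requests := PySem.List.sorted requests (fun x => slen x)
  let st := sorted_requests.foldl
    (fun (st : List (List (List (String × Int))) × List (List (String × Int)) × Int) req =>
      if st.2.1 = [] ∨ |slen req - st.2.2| ≤ 128 then
        (st.1, st.2.1 ++ [req], slen req)
      else
        (st.1 ++ [st.2.1], [req], slen req))
    ([], [], 0)
  if st.2.1 ≠ [] then st.1 ++ [st.2.1] else st.1

-- ===== PORT B =====
-- _solve from Source B.  Slices are ported exactly on their actual ranges: with 0 ≤ mid ≤ len(s),
-- s[:mid] = take mid and s[mid:] = drop mid; with left/right nonempty (always true here),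
-- left[:-1] = dropLast, left[-1] = getLastD, right[0] = headD, right[1:] = drop 1.
-- s.getD is exact for s[mid]/s[mid-1] since 1 ≤ mid < len(s) in the recursive branch.
def solveB (s : List (List (String × Int))) : List (List (List (String × Int))) :=
  if h : s.length ≤ 1 then
    (if s ≠ [] then [s] else [])
  else
    let mid := s.length / 2
    let left := solveB (s.take mid)
    let right := solveB (s.drop mid)
    if slen (s.getD mid []) - slen (s.getD (mid - 1) []) ≤ 128 then
      left.dropLast ++ [left.getLastD [] ++ right.headD []] ++ right.drop 1
    else left ++ right
termination_by s.length
decreasing_by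
  · simp only [List.length_take]; omega
  · simp only [List.length_drop]; omega

def group_by_sequence_length_py_alt (requests : List (List (String × Int))) : List (List (List (String × Int))) :=
  solveB (PySem.List.sorted requests (fun x => slen x))

-- ===== PRECONDITION & SPEC =====
-- Pre_: every request dict carries the key 'seq_len'; on a request without it the Python A raises KeyError.
def Pre_group_by_sequence_length_py (requests : List (List (String × Int))) : Prop :=
  (requests.all (fun r => r.any (fun kv => kv.1 == "seq_len"))) = true
instance (requests : List (List (String × Int))) : Decidable (Pre_group_by_sequence_length_py requests) := by unfold Pre_group_by_sequence_length_py; infer_instance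
def pvWitness_group_by_sequence_length_py : (List (List (String × Int))) :=
  [[("seq_len", 10), ("id", 0)], [("seq_len", 500)], [("seq_len", 90)]]

def Spec_group_by_sequence_length_py (requests : List (List (String × Int))) (out : List (List (List (String × Int)))) : Prop := out = group_by_sequence_length_py_alt requests
instance (requests : List (List (String × Int))) (out : List (List (List (String × Int)))) : Decidable (Spec_group_by_sequence_length_py requests out) := by unfold Spec_group_by_sequence_length_py; infer_instance

-- ===== CLAIM (what is proved, stated in full; the proofs are below) =====
def Claim_equal_group_by_sequence_length_py : Prop := ∀ (requests : List (List (String × Int))), Dom_group_by_sequence_length_py requests → Pre_group_by_sequence_length_py requests → Spec_group_by_sequence_length_py requests (group_by_sequence_length_py requests)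

-- ===== LEMMAS AND PROOFS =====

-- Proof-side middle ground: the canonical recursive grouping of the sorted list.
-- takeRunM p xs = (longest prefix of xs continuing a group whose last length is p, the rest)
def takeRunM (p : Int) : List (List (String × Int)) → List (List (String × Int)) × List (List (String × Int))
  | [] => ([], [])
  | y :: ys =>
    if slen y - p ≤ 128 then
      let t := takeRunM (slen y) ys
      (y :: t.1, t.2)
    else ([], y :: ys)

theorem takeRunM_snd_length_le (p : Int) (xs : List (List (String × Int))) :
    (takeRunM p xs).2.length ≤ xs.length := by
  induction xs generalizing p with
  | nil => simp [takeRunM]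
  | cons y ys ih =>
    simp only [takeRunM]
    split
    · exact le_trans (ih (slen y)) (Nat.le_succ _)
    · exact le_refl _

def splitM : List (List (String × Int)) → List (List (List (String × Int)))
  | [] => []
  | x :: xs =>
    let t := takeRunM (slen x) xs
    (x :: t.1) :: splitM t.2
termination_by xs => xs.length
decreasing_by
  calc (takeRunM (slen x) xs).2.length ≤ xs.length := takeRunM_snd_length_le _ _
    _ < (x :: xs).length := by simp

theorem takeRunM_fst (p : Int) (xs : List (List (String × Int))) :
    (takeRunM p xs).1 = xs.take (takeRunM p xs).1.length := by
  induction xs generalizing p with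
  | nil => simp [takeRunM]
  | cons y ys ih =>
    simp only [takeRunM]
    split
    · simpa using ih (slen y)
    · simp

theorem takeRunM_snd (p : Int) (xs : List (List (String × Int))) :
    (takeRunM p xs).2 = xs.drop (takeRunM p xs).1.length := by
  induction xs generalizing p with
  | nil => simp [takeRunM]
  | cons y ys ih =>
    simp only [takeRunM]
    split
    · simpa using ih (slen y)
    · simp

-- ===== A-side: the fold equals splitM on a sorted list =====

theorem loopA_eq (s : List (List (String × Int)))
    (groups : List (List (List (String × Int)))) (cur : List (List (String × Int))) (curlen : Int)
    (hcur : cur ≠ [])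
    (hmin : ∀ y ∈ s, curlen ≤ slen y)
    (hpair : s.Pairwise (fun a b => slen a ≤ slen b)) :
    (let st := s.foldl
      (fun (st : List (List (List (String × Int))) × List (List (String × Int)) × Int) req =>
        if st.2.1 = [] ∨ |slen req - st.2.2| ≤ 128 then
          (st.1, st.2.1 ++ [req], slen req)
        else
          (st.1 ++ [st.2.1], [req], slen req))
      (groups, cur, curlen)
     if st.2.1 ≠ [] then st.1 ++ [st.2.1] else st.1)
    = groups ++ (cur ++ (takeRunM curlen s).1) :: splitM (takeRunM curlen s).2 := by
  induction s generalizing groups cur curlen with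
  | nil => simp [takeRunM, splitM, hcur]
  | cons r rest ih =>
    have hle : curlen ≤ slen r := hmin r (List.mem_cons_self)
    have habs : |slen r - curlen| = slen r - curlen := abs_of_nonneg (by omega)
    rw [List.pairwise_cons] at hpair
    simp only [List.foldl_cons, takeRunM]
    by_cases hgap : slen r - curlen ≤ 128
    · have hcond : (cur = [] ∨ |slen r - curlen| ≤ 128) := Or.inr (by rw [habs]; exact hgap)
      rw [if_pos hcond, if_pos hgap]
      have := ih groups (cur ++ [r]) (slen r) (by simp) hpair.1 hpair.2
      simp only at this
      rw [this]
      simp [List.append_assoc]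
    · have hcond : ¬ (cur = [] ∨ |slen r - curlen| ≤ 128) := by
        rw [habs]
        rintro (hc | hc)
        · exact hcur hc
        · omega
      rw [if_neg hcond, if_neg hgap]
      have := ih (groups ++ [cur]) [r] (slen r) (by simp) hpair.1 hpair.2
      simp only at this
      rw [this]
      simp only [splitM]
      simp [List.append_assoc]

theorem loopA_full (s : List (List (String × Int)))
    (hpair : s.Pairwise (fun a b => slen a ≤ slen b)) :
    (let st := s.foldl
      (fun (st : List (List (List (String × Int))) × List (List (String × Int)) × Int) req =>
        if st.2.1 = [] ∨ |slen req - st.2.2| ≤ 128 then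
          (st.1, st.2.1 ++ [req], slen req)
        else
          (st.1 ++ [st.2.1], [req], slen req))
      ([], [], 0)
     if st.2.1 ≠ [] then st.1 ++ [st.2.1] else st.1)
    = splitM s := by
  cases s with
  | nil => simp [splitM]
  | cons x xs =>
    rw [List.pairwise_cons] at hpair
    show (let st := List.foldl _ (if ([] : List (List (String × Int))) = [] ∨ |slen x - 0| ≤ 128
        then (([] : List (List (List (String × Int)))), [] ++ [x], slen x)
        else ([] ++ [([] : List (List (String × Int)))], [x], slen x)) xs
      if st.2.1 ≠ [] then st.1 ++ [st.2.1] else st.1) = splitM (x :: xs)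
    rw [if_pos (Or.inl rfl)]
    have := loopA_eq xs [] [x] (slen x) (by simp) hpair.1 hpair.2
    simp only [List.nil_append] at this ⊢
    rw [this]
    simp [splitM]

theorem portA_eq_splitM (requests : List (List (String × Int))) :
    group_by_sequence_length_py requests
      = splitM (PySem.List.sorted requests (fun x => slen x)) := by
  have hpair := PySem.List.sorted_pairwise requests (fun x => slen x)
  unfold group_by_sequence_length_py
  exact loopA_full _ hpair

-- ===== B-side: the divide-and-conquer equals splitM =====

-- the last seq_len of the chain p, xs
def lastLen (p : Int) : List (List (String × Int)) → Int
  | [] => p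
  | x :: xs => lastLen (slen x) xs

theorem lastLen_eq (x : List (String × Int)) (xs : List (List (String × Int))) :
    lastLen (slen x) xs = slen ((x :: xs).getLastD []) := by
  induction xs generalizing x with
  | nil => simp [lastLen]
  | cons y ys ih => simpa [lastLen] using ih y

theorem takeRunM_append (p : Int) (xs ys : List (List (String × Int))) :
    takeRunM p (xs ++ ys) =
      if (takeRunM p xs).2 = [] then
        ((takeRunM p xs).1 ++ (takeRunM (lastLen p xs) ys).1, (takeRunM (lastLen p xs) ys).2)
      else ((takeRunM p xs).1, (takeRunM p xs).2 ++ ys) := by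
  induction xs generalizing p with
  | nil => simp [takeRunM, lastLen]
  | cons x xs' ih =>
    simp only [List.cons_append, takeRunM, lastLen]
    by_cases hgap : slen x - p ≤ 128
    · rw [if_pos hgap, if_pos hgap]
      rw [ih (slen x)]
      by_cases ht : (takeRunM (slen x) xs').2 = []
      · simp [ht]
      · simp [ht]
    · rw [if_neg hgap, if_neg hgap]
      simp

theorem splitM_ne_nil (xs : List (List (String × Int))) (h : xs ≠ []) : splitM xs ≠ [] := by
  cases xs with
  | nil => exact absurd rfl h
  | cons x xs' => rw [splitM]; simp

theorem splitM_append (xs ys : List (List (String × Int))) (hxs : xs ≠ []) (hys : ys ≠ []) :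
    splitM (xs ++ ys) =
      if slen (ys.headD []) - slen (xs.getLastD []) ≤ 128 then
        (splitM xs).dropLast ++ ((splitM xs).getLastD [] ++ (splitM ys).headD []) :: (splitM ys).drop 1
      else splitM xs ++ splitM ys := by
  match xs with
  | x :: xs' =>
    have hsplit : xs' = (takeRunM (slen x) xs').1 ++ (takeRunM (slen x) xs').2 := by
      conv_lhs => rw [← List.take_append_drop (takeRunM (slen x) xs').1.length xs']
      rw [← takeRunM_fst, ← takeRunM_snd]
    rw [List.cons_append, splitM, takeRunM_append]
    by_cases ht : (takeRunM (slen x) xs').2 = []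
    · -- the whole left list is one run
      have h1 : (takeRunM (slen x) xs').1 = xs' := by
        conv_rhs => rw [hsplit, ht]
        rw [List.append_nil]
      have hsx : splitM (x :: xs') = [x :: xs'] := by
        rw [splitM]
        simp only [ht, h1, splitM]
      rw [if_pos ht]
      match ys, hys with
      | y :: ys', _ =>
        have hq : lastLen (slen x) xs' = slen ((x :: xs').getLastD []) := lastLen_eq x xs'
        simp only [takeRunM, hq]
        by_cases hgap : slen y - slen ((x :: xs').getLastD []) ≤ 128
        · rw [if_pos hgap, if_pos (by simpa using hgap)]
          simp only [hsx]
          rw [show splitM (y :: ys')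
              = (y :: (takeRunM (slen y) ys').1) :: splitM (takeRunM (slen y) ys').2 from by
            rw [splitM]]
          simp [h1]
        · rw [if_neg hgap, if_neg (by simpa using hgap)]
          simp only [hsx, h1, List.append_nil, List.singleton_append]
    · -- the left list has more than one group; recurse into its tail
      rw [if_neg ht]
      have hlen : (takeRunM (slen x) xs').2.length < (x :: xs').length := by
        have := takeRunM_snd_length_le (slen x) xs'
        simp only [List.length_cons]; omega
      have ihr := splitM_append (takeRunM (slen x) xs').2 ys ht hys
      rw [ihr]
      have habs : ∀ (a b : List (List (String × Int))), b ≠ [] →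
          (a ++ b).getLastD ([] : List (String × Int)) = b.getLastD [] := by
        rintro a (_ | ⟨z, zs⟩) hb
        · exact absurd rfl hb
        · rw [List.getLastD_eq_getLast?, List.getLastD_eq_getLast?, List.getLast?_append_cons]
      have hlast : (x :: xs').getLastD [] = (takeRunM (slen x) xs').2.getLastD [] := by
        conv_lhs => rw [show (x :: xs') = (x :: (takeRunM (slen x) xs').1) ++ (takeRunM (slen x) xs').2 by
          rw [List.cons_append, ← hsplit]]
        exact habs _ _ ht
      have hne2 := splitM_ne_nil _ ht
      rw [hlast]
      by_cases hgap : slen (ys.headD []) - slen ((takeRunM (slen x) xs').2.getLastD []) ≤ 128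
      · rw [if_pos hgap, if_pos hgap]
        conv_rhs => rw [splitM]
        match h2 : splitM (takeRunM (slen x) xs').2, hne2 with
        | g :: gs, _ => simp
      · rw [if_neg hgap, if_neg hgap]
        conv_rhs => rw [splitM]
        simp
termination_by xs.length
decreasing_by
  simp only [List.length_cons]
  have := takeRunM_snd_length_le (slen x) xs'
  omega

theorem solveB_eq_splitM (s : List (List (String × Int))) : solveB s = splitM s := by
  by_cases h : s.length ≤ 1
  · rw [solveB, dif_pos h]
    match s, h with
    | [], _ => simp [splitM]
    | [x], _ => simp [splitM, takeRunM]
  · rw [solveB, dif_neg h]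
    have hn : 2 ≤ s.length := by omega
    have hmid1 : 1 ≤ s.length / 2 := by omega
    have hmidn : s.length / 2 < s.length := by omega
    have ihl := solveB_eq_splitM (s.take (s.length / 2))
    have ihr := solveB_eq_splitM (s.drop (s.length / 2))
    simp only [ihl, ihr]
    have htne : s.take (s.length / 2) ≠ [] := by
      intro hc
      have := congrArg List.length hc
      simp only [List.length_take, List.length_nil] at this
      omega
    have hdne : s.drop (s.length / 2) ≠ [] := by
      intro hc
      have := congrArg List.length hc
      simp only [List.length_drop, List.length_nil] at this
      omega
    have happ := splitM_append (s.take (s.length / 2)) (s.drop (s.length / 2)) htne hdne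
    rw [List.take_append_drop] at happ
    rw [happ]
    have hhead : (s.drop (s.length / 2)).headD [] = s.getD (s.length / 2) [] := by
      rw [List.headD_eq_head?, List.head?_drop, List.getD_eq_getElem?_getD]
    have hlast : (s.take (s.length / 2)).getLastD [] = s.getD (s.length / 2 - 1) [] := by
      rw [List.getLastD_eq_getLast?, List.getLast?_eq_getElem?, List.getD_eq_getElem?_getD,
        List.length_take, Nat.min_eq_left (Nat.le_of_lt hmidn),
        List.getElem?_take_of_lt (by omega)]
    rw [hhead, hlast]
    by_cases hgap : slen (s.getD (s.length / 2) []) - slen (s.getD (s.length / 2 - 1) []) ≤ 128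
    · rw [if_pos hgap, if_pos hgap]
      simp
    · rw [if_neg hgap, if_neg hgap]
termination_by s.length
decreasing_by
  · simp only [List.length_take]; omega
  · simp only [List.length_drop]; omega

-- ===== VERDICT (by name: the statement is the Claim_ definition above) =====
theorem group_by_sequence_length_py_spec : Claim_equal_group_by_sequence_length_py := by
  intro requests _ _
  show group_by_sequence_length_py requests
      = solveB (PySem.List.sorted requests (fun x => slen x))
  rw [portA_eq_splitM, solveB_eq_splitM]
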